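-- pv_equiv track=rewrite | github.com/Nikkuniku/AtcoderProgramming | ABC/ABC200~ABC299/ABC276/d.py | f
-- ===== SOURCE A (Python) =====
-- def f(m, p):
--     res = 1 << 62
--     ok = False
--     for i in range(30):
--         for j in range(30):
--             if m == p*pow(2, i)*pow(3, j):
--                 res = min(res, i+j)
--                 ok = True
--     if ok:
--         return (ok, res)
--     return (False, -1)
-- ===== SOURCE B (Python) =====
-- def _count(d, q):
--     c = 0
--     while q % d == 0:
--         q //= d
--         c += 1
--     return c, q
--
--
-- def f(m, p):
--     if p == 0:
--         return (True, 0) if m == 0 else (False, -1)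
--     if m % p != 0:
--         return (False, -1)
--     q = m // p
--     if q <= 0:
--         return (False, -1)
--     i, q = _count(2, q)
--     j, q = _count(3, q)
--     if q == 1 and i < 30 and j < 30:
--         return (True, i + j)
--     return (False, -1)
-- ===== Notes on version B (the rewrite author's own statement) =====
-- stated objective: faster
-- what changed: Replaces A's exhaustive 900-iteration search over all exponent pairs (i,j) in range(30)x range(30) by direct factor counting: B checks p==0 and divisibility, sets q = m//p, strips factors of 2 then 3 from q while counting them, and accepts iff the remainder is 1 with both counts below 30.
import Mathlib
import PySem

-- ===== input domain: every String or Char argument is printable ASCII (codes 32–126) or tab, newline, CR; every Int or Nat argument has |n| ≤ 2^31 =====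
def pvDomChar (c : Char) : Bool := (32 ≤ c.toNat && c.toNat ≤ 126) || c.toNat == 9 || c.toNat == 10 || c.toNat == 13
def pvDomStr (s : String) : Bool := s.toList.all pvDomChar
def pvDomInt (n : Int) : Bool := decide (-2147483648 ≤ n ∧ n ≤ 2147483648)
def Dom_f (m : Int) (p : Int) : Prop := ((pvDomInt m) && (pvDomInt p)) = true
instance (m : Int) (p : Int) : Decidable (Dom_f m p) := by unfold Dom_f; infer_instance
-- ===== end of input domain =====

-- B replaces A's 900-iteration search over all exponent pairs (i, j) by direct factor
-- counting on q = m // p (after explicit p == 0 / divisibility / sign checks); objective: faster.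

-- ===== PORT A =====
-- i, j from range(30) are nonnegative, so Python's pow(2, i) is (2 : Int) ^ i.toNat exactly.
def f (m : Int) (p : Int) : Bool × Int :=
  let st : Int × Bool :=
    (PySem.List.pyRange 0 30 1).foldl (fun st i =>
      (PySem.List.pyRange 0 30 1).foldl (fun st j =>
        if m = p * 2 ^ i.toNat * 3 ^ j.toNat then (min st.1 (i + j), true) else st) st)
      ((1 : Int) <<< 62, false)
  if st.2 then (st.2, st.1) else (false, -1)

-- ===== PORT B =====
-- port of Source B's _count: the 'while q % d == 0' division loop, on the positive q as a Nat
def fCount (d : Nat) (q : Nat) : Nat × Nat :=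
  if h : 2 ≤ d ∧ 0 < q ∧ q % d = 0 then
    let r := fCount d (q / d)
    (r.1 + 1, r.2)
  else (0, q)
  termination_by q
  decreasing_by exact Nat.div_lt_self h.2.1 (by omega)


def f_alt (m : Int) (p : Int) : Bool × Int :=
  if p = 0 then (if m = 0 then (true, 0) else (false, -1))
  else if PySem.Int.mod m p ≠ 0 then (false, -1)
  else
    let q := PySem.Int.floordiv m p
    if q ≤ 0 then (false, -1)
    else
      let c2 := fCount 2 q.toNat
      let c3 := fCount 3 c2.2
      if c3.2 = 1 ∧ c2.1 < 30 ∧ c3.1 < 30 then (true, (c2.1 : Int) + (c3.1 : Int))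
      else (false, -1)

-- ===== PRECONDITION & SPEC =====
def Spec_f (m : Int) (p : Int) (out : Bool × Int) : Prop := out = f_alt m p
instance (m : Int) (p : Int) (out : Bool × Int) : Decidable (Spec_f m p out) := by unfold Spec_f; infer_instance

-- ===== CLAIM (what is proved, stated in full; the proofs are below) =====
def Claim_equal_f : Prop := ∀ (m : Int) (p : Int), Dom_f m p → Spec_f m p (f m p)

-- ===== LEMMAS AND PROOFS =====

def pvL : List Int := PySem.List.pyRange 0 30 1
def pvG (m p : Int) : Int × Bool → Int × Int → Int × Bool := fun st x =>
  if m = p * 2 ^ x.1.toNat * 3 ^ x.2.toNat then (min st.1 (x.1 + x.2), true) else st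
def pvPairs : List (Int × Int) := (pvL.map (fun i => pvL.map (fun j => (i, j)))).flatten

theorem pv_f_eq (m p : Int) :
    f m p = (let st := pvPairs.foldl (pvG m p) ((1 : Int) <<< 62, false);
             if st.2 then (st.2, st.1) else (false, -1)) := by
  simp only [f, pvPairs, pvL, List.foldl_flatten, List.foldl_map, pvG]

theorem pv_mem_pairs (x : Int × Int) :
    x ∈ pvPairs ↔ (0 ≤ x.1 ∧ x.1 < 30) ∧ (0 ≤ x.2 ∧ x.2 < 30) := by
  obtain ⟨a, b⟩ := x
  simp [pvPairs, pvL, List.mem_flatten, List.mem_map, PySem.List.mem_pyRange_one]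

theorem pv_no_hit (m p : Int) (l : List (Int × Int)) (st : Int × Bool)
    (h : ∀ x ∈ l, ¬ m = p * 2 ^ x.1.toNat * 3 ^ x.2.toNat) :
    l.foldl (pvG m p) st = st := by
  induction l generalizing st with
  | nil => rfl
  | cons a t ih =>
    simp only [List.foldl_cons]
    rw [show pvG m p st a = st from by simp [pvG, h a (by simp)]]
    exact ih st (fun x hx => h x (by simp [hx]))

theorem pv_absorb (m p : Int) (x0 : Int × Int) (l : List (Int × Int))
    (h : ∀ x ∈ l, m = p * 2 ^ x.1.toNat * 3 ^ x.2.toNat → x = x0) (s : Int) :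
    l.foldl (pvG m p) (min s (x0.1 + x0.2), true) = (min s (x0.1 + x0.2), true) := by
  induction l with
  | nil => rfl
  | cons a t ih =>
    simp only [List.foldl_cons]
    by_cases hc : m = p * 2 ^ a.1.toNat * 3 ^ a.2.toNat
    · have ha : a = x0 := h a (by simp) hc
      subst ha
      rw [show pvG m p (min s (a.1 + a.2), true) a
            = (min s (a.1 + a.2), true) from by
        simp [pvG, hc]]
      exact ih (fun x hx => h x (by simp [hx]))
    · rw [show pvG m p (min s (x0.1 + x0.2), true) a = (min s (x0.1 + x0.2), true) from by
        simp [pvG, hc]]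
      exact ih (fun x hx => h x (by simp [hx]))

theorem pv_one_hit (m p : Int) (x0 : Int × Int) (l : List (Int × Int))
    (h : ∀ x ∈ l, m = p * 2 ^ x.1.toNat * 3 ^ x.2.toNat → x = x0)
    (hc : m = p * 2 ^ x0.1.toNat * 3 ^ x0.2.toNat) (hm : x0 ∈ l) (st : Int × Bool) :
    l.foldl (pvG m p) st = (min st.1 (x0.1 + x0.2), true) := by
  induction l generalizing st with
  | nil => exact absurd hm (by simp)
  | cons a t ih =>
    simp only [List.foldl_cons]
    by_cases hca : m = p * 2 ^ a.1.toNat * 3 ^ a.2.toNat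
    · have ha : a = x0 := h a (by simp) hca
      subst ha
      rw [show pvG m p st a = (min st.1 (a.1 + a.2), true) from by simp [pvG, hca]]
      exact pv_absorb m p a t (fun x hx => h x (by simp [hx])) st.1
    · have hx0t : x0 ∈ t := by
        rcases List.mem_cons.mp hm with h1 | h1
        · exact absurd (h1 ▸ hc) hca
        · exact h1
      rw [show pvG m p st a = st from by simp [pvG, hca]]
      exact ih (fun x hx => h x (by simp [hx])) hx0t st

theorem pv_fCount_pow (d a r : Nat) (hd : 2 ≤ d) (hr : 0 < r) (hrd : r % d ≠ 0) :
    fCount d (d ^ a * r) = (a, r) := by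
  induction a with
  | zero => rw [fCount]; simp [hrd]
  | succ n ih =>
    rw [fCount]
    have hq : d ^ (n + 1) * r = d * (d ^ n * r) := by ring
    have hmod : d ^ (n + 1) * r % d = 0 := by
      rw [hq]; exact Nat.mul_mod_right d _
    have hpos : 0 < d ^ (n + 1) * r := by positivity
    rw [dif_pos ⟨hd, hpos, hmod⟩]
    have hdiv : d ^ (n + 1) * r / d = d ^ n * r := by
      rw [hq]; exact Nat.mul_div_cancel_left _ (by omega)
    simp [hdiv, ih]

theorem pv_fCount_spec (d : Nat) (hd : 2 ≤ d) :
    ∀ q, 0 < q →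
      q = d ^ (fCount d q).1 * (fCount d q).2 ∧ (fCount d q).2 % d ≠ 0 ∧ 0 < (fCount d q).2 := by
  intro q
  induction q using Nat.strong_induction_on with
  | _ q ih =>
    intro hq
    rw [fCount]
    by_cases h : q % d = 0
    · rw [dif_pos ⟨hd, hq, h⟩]
      have hdvd : d ∣ q := Nat.dvd_of_mod_eq_zero h
      have hlt : q / d < q := Nat.div_lt_self hq (by omega)
      have hq' : 0 < q / d := Nat.div_pos (Nat.le_of_dvd hq hdvd) (by omega)
      obtain ⟨h1, h2, h3⟩ := ih (q / d) hlt hq'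
      refine ⟨?_, h2, h3⟩
      calc q = d * (q / d) := (Nat.mul_div_cancel' hdvd).symm
        _ = d * (d ^ (fCount d (q / d)).1 * (fCount d (q / d)).2) := by rw [← h1]
        _ = d ^ ((fCount d (q / d)).1 + 1) * (fCount d (q / d)).2 := by ring
    · rw [dif_neg (by simp [h])]
      simpa using ⟨h, hq⟩

-- all-hit / tail lemma for the p = 0, m = 0 case
theorem pv_zero_keep (m p : Int) (l : List (Int × Int))
    (h : ∀ x ∈ l, 0 ≤ x.1 + x.2) :
    l.foldl (pvG m p) (0, true) = (0, true) := by
  induction l with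
  | nil => rfl
  | cons a t ih =>
    simp only [List.foldl_cons]
    have h0 : 0 ≤ a.1 + a.2 := h a (by simp)
    rw [show pvG m p (0, true) a = (0, true) from by
      simp [pvG]; intro _; omega]
    exact ih (fun x hx => h x (by simp [hx]))

theorem pv_main (m p : Int) : f m p = f_alt m p := by
  rw [pv_f_eq]
  by_cases hp : p = 0
  · subst hp
    by_cases hm : m = 0
    · subst hm
      have hL : PySem.List.pyRange 0 30 1 = (0 : Int) :: PySem.List.pyRange 1 30 1 := by
        rw [PySem.List.pyRange_one_cons (by norm_num)]; norm_num
      have hsplit : pvPairs = (0, 0) ::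
          ((PySem.List.pyRange 1 30 1).map (fun j => ((0 : Int), j)) ++
           ((PySem.List.pyRange 1 30 1).map
             (fun i => (PySem.List.pyRange 0 30 1).map (fun j => (i, j)))).flatten) := by
        conv_lhs => rw [pvPairs, pvL, hL]
        rw [List.map_cons, List.flatten_cons, List.map_cons, hL]
        rfl
      rw [hsplit]
      rw [List.foldl_cons]
      have hs62 : ((1 : Int) <<< 62) = 4611686018427387904 := by decide
      have hstep : pvG 0 0 ((1 : Int) <<< 62, false) (0, 0) = (0, true) := by
        rw [pvG]; norm_num [hs62]
      rw [hstep, pv_zero_keep]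
      · simp [f_alt]
      · intro x hx
        simp only [List.mem_append, List.mem_map, List.mem_flatten] at hx
        rcases hx with ⟨j, hj, rfl⟩ | ⟨l', ⟨i, hi, rfl⟩, hx⟩
        · have := (PySem.List.mem_pyRange_one).mp hj; simp; omega
        · obtain ⟨j, hj, rfl⟩ := List.mem_map.mp hx
          have h1 := (PySem.List.mem_pyRange_one).mp hi
          have h2 := (PySem.List.mem_pyRange_one).mp hj
          simp; omega
    · rw [pv_no_hit m 0 pvPairs _ (fun x _ => by simpa using hm)]
      simp [f_alt, hm]
  · -- p ≠ 0
    by_cases hmod : PySem.Int.mod m p = 0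
    · have hmp : m = PySem.Int.floordiv m p * p := by
        have h := PySem.Int.floordiv_mul_add_mod m p
        rw [hmod, add_zero] at h
        exact h.symm
      set q := PySem.Int.floordiv m p with hq
      have hcancel : ∀ K : Int, m = p * K → q = K := by
        intro K hK
        apply mul_left_cancel₀ hp
        rw [mul_comm p q, ← hmp, hK]
      have hcancel' : ∀ x : Int × Int, m = p * 2 ^ x.1.toNat * 3 ^ x.2.toNat →
          q = 2 ^ x.1.toNat * 3 ^ x.2.toNat := by
        intro x hx
        exact hcancel _ (by rw [hx]; ring)
      by_cases hqpos : q ≤ 0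
      · rw [pv_no_hit m p pvPairs _ (fun x _ hx => by
          have := hcancel' x hx
          have hpos : (0 : Int) < 2 ^ x.1.toNat * 3 ^ x.2.toNat := by positivity
          omega)]
        simp [f_alt, hp, hmod, ← hq, hqpos]
      · rw [not_le] at hqpos
        set n := q.toNat with hn
        have hnq : (n : Int) = q := Int.toNat_of_nonneg (le_of_lt hqpos)
        have hnpos : 0 < n := by omega
        obtain ⟨h21, h22, h23⟩ := pv_fCount_spec 2 (by norm_num) n hnpos
        obtain ⟨h31, h32, h33⟩ := pv_fCount_spec 3 (by norm_num) (fCount 2 n).2 h23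
        set i := (fCount 2 n).1 with hi
        set r := (fCount 2 n).2 with hr
        set j := (fCount 3 r).1 with hj
        set r2 := (fCount 3 r).2 with hr2
        -- determinism: any factorization n = 2^a*3^b forces a = i, b = j, r2 = 1
        have hdet : ∀ a b : Nat, n = 2 ^ a * 3 ^ b → a = i ∧ b = j ∧ r2 = 1 := by
          intro a b hab
          have hodd : (3 : Nat) ^ b % 2 = 1 := by simp [Nat.pow_mod]
          have h2 : fCount 2 n = (a, 3 ^ b) := by
            rw [hab]; exact pv_fCount_pow 2 a (3 ^ b) (by norm_num) (by positivity) (by omega)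
          have hia : i = a := by rw [hi, h2]
          have hra : r = 3 ^ b := by rw [hr, h2]
          have h3 : fCount 3 r = (b, 1) := by
            rw [hra, show (3:Nat) ^ b = 3 ^ b * 1 from (mul_one _).symm]
            exact pv_fCount_pow 3 b 1 (by norm_num) (by norm_num) (by norm_num)
          have hjb : j = b := by rw [hj, h3]
          have hr21 : r2 = 1 := by rw [hr2, h3]
          exact ⟨hia.symm, hjb.symm, hr21⟩
        -- hit ↔ factorization of n
        have hhit : ∀ x : Int × Int, m = p * 2 ^ x.1.toNat * 3 ^ x.2.toNat →
            n = 2 ^ x.1.toNat * 3 ^ x.2.toNat := by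
          intro x hx
          have h1 : q = 2 ^ x.1.toNat * 3 ^ x.2.toNat := hcancel' x hx
          have : q = ((2 ^ x.1.toNat * 3 ^ x.2.toNat : Nat) : Int) := by
            rw [h1]; push_cast; ring
          omega
        by_cases hok : r2 = 1 ∧ i < 30 ∧ j < 30
        · obtain ⟨hok1, hok2, hok3⟩ := hok
          have hnij : n = 2 ^ i * 3 ^ j := by
            rw [h21, h31, hok1, mul_one]
          have hCx0 : m = p * 2 ^ ((i : Int)).toNat * 3 ^ ((j : Int)).toNat := by
            simp only [Int.toNat_natCast]
            rw [hmp, ← hnq, hnij]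
            push_cast; ring
          rw [pv_one_hit m p ((i : Int), (j : Int)) pvPairs
              (fun x hx hcx => by
                have hb := (pv_mem_pairs x).mp hx
                have hfac := hhit x hcx
                obtain ⟨ha, hbb, _⟩ := hdet _ _ hfac
                have : x.1 = (i : Int) := by omega
                have : x.2 = (j : Int) := by omega
                exact Prod.ext (by omega) (by omega))
              hCx0
              ((pv_mem_pairs _).mpr (by refine ⟨⟨?_, ?_⟩, ?_, ?_⟩ <;> omega))]
          have hshift : ((1 : Int) <<< 62) = 4611686018427387904 := by decide
          have hmin : min ((1 : Int) <<< 62) ((i : Int) + (j : Int)) = (i : Int) + (j : Int) := by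
            rw [hshift]; apply min_eq_right; omega
          simp only [hmin]
          simp [f_alt, hp, hmod, ← hq, not_le.mpr hqpos, ← hn, ← hi, ← hr, ← hj, ← hr2,
                hok1, hok2, hok3]
        · rw [pv_no_hit m p pvPairs _ (fun x hx hcx => by
            have hb := (pv_mem_pairs x).mp hx
            obtain ⟨ha, hbb, hr21⟩ := hdet _ _ (hhit x hcx)
            exact hok ⟨hr21, by omega, by omega⟩)]
          simp [f_alt, hp, hmod, ← hq, not_le.mpr hqpos, ← hn, ← hi, ← hr, ← hj, ← hr2, hok]
    · rw [pv_no_hit m p pvPairs _ (fun x _ hx => by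
        have : p ∣ m := ⟨2 ^ x.1.toNat * 3 ^ x.2.toNat, by rw [hx]; ring⟩
        exact hmod ((PySem.Int.mod_eq_zero_iff_dvd m p).mpr this))]
      simp [f_alt, hp, hmod]

-- ===== VERDICT (by name: the statement is the Claim_ definition above) =====
theorem f_spec : Claim_equal_f := by
  intro m p _
  unfold Spec_f
  exact pv_main m p
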